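-- pv_equiv track=rewrite | github.com/Ddilibe/tetris | src/utils.py | get_col_pattern_number
-- ===== SOURCE A (Python) =====
-- ROWS = 23  # number of rows in the bit matrix
--
-- COLS = 18  # number of columns
--
-- TOTAL_BITS = ROWS * COLS  # total = 414 bits
--
-- def get_col_pattern_number(k: int) -> int:
--     """
--     Return a 414-bit integer with 1s placed vertically down column `k`.
--
--     Args:
--         k (int): The column index (1-based).
--
--     Returns:
--         int: A 414-bit integer with bits set in column `k`.
--
--     Raises:
--         ValueError: If column index is out of range.
--
--     Explanation:
--         We treat the entire 23×18 bit matrix as one continuous 414-bit number.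
--         Bit layout is row-major from top-left → bottom-right.
--         For a given column `k`, we set bit at every row on that column.
--     """
--     if not (1 <= k <= COLS):
--         raise ValueError(f"Column index k must be between 1 and {COLS}.")
--
--     col_index = k - 1  # convert to 0-based index
--     result_number = 0
--
--     for r in range(ROWS):
--         # Compute absolute bit index from MSB
--         bit_position = (TOTAL_BITS - 1) - (r * COLS + col_index)
--
--         # Set that bit in result_number
--         result_number |= 1 << bit_position
--
--     return result_number
-- ===== SOURCE B (Python) =====
-- ROWS = 23
-- COLS = 18
-- TOTAL_BITS = ROWS * COLS
--
-- def get_col_pattern_number(k: int) -> int: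
--     # Closed form: the base mask has one bit per row in the rightmost column
--     # (geometric series sum of 2**(r*COLS)); shift it left to column k.
--     if not (1 <= k <= COLS):
--         raise ValueError(f"Column index k must be between 1 and {COLS}.")
--     base = (2**TOTAL_BITS - 1) // (2**COLS - 1)
--     return base << (COLS - k)
-- ===== Notes on version B (the rewrite author's own statement) =====
-- stated objective: simpler
-- what changed: The per-row loop setting one bit at a time is replaced by a closed form: the rightmost-column mask (2**414-1)//(2**18-1) shifted left by COLS-k.
import Mathlib
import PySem

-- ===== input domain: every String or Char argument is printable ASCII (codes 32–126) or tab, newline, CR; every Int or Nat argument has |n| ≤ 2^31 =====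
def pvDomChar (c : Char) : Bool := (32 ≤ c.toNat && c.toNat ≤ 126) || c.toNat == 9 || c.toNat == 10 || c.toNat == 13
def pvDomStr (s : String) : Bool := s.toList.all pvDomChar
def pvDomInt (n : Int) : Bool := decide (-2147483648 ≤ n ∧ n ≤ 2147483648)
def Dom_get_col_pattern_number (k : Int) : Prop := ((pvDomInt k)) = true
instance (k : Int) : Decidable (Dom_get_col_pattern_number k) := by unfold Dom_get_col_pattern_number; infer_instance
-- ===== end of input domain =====

-- B replaces A's per-row bit-setting loop by a closed-form column mask (simpler).
-- A raises ValueError for k outside 1..18; those inputs are excluded by Pre_.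

-- ===== PORT A =====
-- loop over range(ROWS), OR-ing 1 << bit_position; bit_position ≥ 0 throughout,
-- so '.toNat' on it is exact for Python's '<<'
def get_col_pattern_number (k : Int) : Int :=
  let col_index : Int := k - 1
  (PySem.List.pyRange 0 23 1).foldl
    (fun result_number r =>
      let bit_position : Int := (414 - 1) - (r * 18 + col_index)
      Int.lor result_number ((1 : Int) <<< bit_position.toNat))
    0

-- ===== PORT B =====
-- '//' ported with PySem.Int.floordiv; COLS - k ≥ 0 under Pre_, so '.toNat' is exact
def get_col_pattern_number_alt (k : Int) : Int :=
  let base : Int := PySem.Int.floordiv (2 ^ 414 - 1) (2 ^ 18 - 1)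
  base <<< ((18 : Int) - k).toNat

-- ===== PRECONDITION & SPEC =====
-- Pre_ excludes exactly the inputs on which A raises ValueError (k outside 1..COLS)
def Pre_get_col_pattern_number (k : Int) : Prop := 1 ≤ k ∧ k ≤ 18
instance (k : Int) : Decidable (Pre_get_col_pattern_number k) := by unfold Pre_get_col_pattern_number; infer_instance
def pvWitness_get_col_pattern_number : Int := 3

def Spec_get_col_pattern_number (k : Int) (out : Int) : Prop := out = get_col_pattern_number_alt k
instance (k : Int) (out : Int) : Decidable (Spec_get_col_pattern_number k out) := by unfold Spec_get_col_pattern_number; infer_instance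

-- ===== CLAIM (what is proved, stated in full; the proofs are below) =====
def Claim_equal_get_col_pattern_number : Prop := ∀ (k : Int), Dom_get_col_pattern_number k → Pre_get_col_pattern_number k → Spec_get_col_pattern_number k (get_col_pattern_number k)

-- ===== LEMMAS AND PROOFS =====

-- ===== VERDICT (by name: the statement is the Claim_ definition above) =====
theorem get_col_pattern_number_spec : Claim_equal_get_col_pattern_number := by
  intro k _ hk
  obtain ⟨h1, h2⟩ := hk
  unfold Spec_get_col_pattern_number
  interval_cases k <;> decide
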